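-- pv_equiv track=rewrite | github.com/caldweld/TowerScoreBoardBot | cogs/stats_cog.py | format_stat_value
-- ===== SOURCE A (Python) =====
-- def format_stat_value(value):
--     """Format stat value to add space between number and letter suffix"""
--     if value is None:
--         return 'N/A'
--
--     # Define all possible suffixes
--     suffixes = ['K', 'M', 'B', 'T', 'q', 'Q', 's', 'S', 'O', 'N', 'D', 'aa', 'ab', 'ac', 'ad']
--
--     # Check if value ends with any suffix
--     for suffix in sorted(suffixes, key=len, reverse=True):
--         if str(value).endswith(suffix):
--             # Add space before the suffix
--             return str(value)[:-len(suffix)] + ' ' + suffix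
--
--     return str(value)
-- ===== SOURCE B (Python) =====
-- _SUFFIXES = ['K', 'M', 'B', 'T', 'q', 'Q', 's', 'S', 'O', 'N', 'D', 'aa', 'ab', 'ac', 'ad']
--
-- # Automaton states: reversed suffix prefixes -> accepting?  (built once at import)
-- _STATES = {}
-- for _suf in _SUFFIXES:
--     _r = _suf[::-1]
--     for _i in range(1, len(_r)):
--         if _r[:_i] not in _STATES:
--             _STATES[_r[:_i]] = False
--     _STATES[_r] = True
--
--
-- def format_stat_value(value):
--     """Format stat value by running the reversed string through a suffix automaton."""
--     if value is None:
--         return 'N/A'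
--     s = str(value)
--     prefix = ''
--     best = 0
--     for ch in reversed(s):
--         prefix += ch
--         if prefix not in _STATES:
--             break
--         if _STATES[prefix]:
--             best = len(prefix)
--     if best:
--         return s[:-best] + ' ' + s[-best:]
--     return s
-- ===== Notes on version B (the rewrite author's own statement) =====
-- stated objective: alternative
-- what changed: Replaced the sort-then-scan over 15 suffix strings (an endswith test per suffix) by a suffix automaton: a prefix-state dict built once from the reversed suffixes, walked over the reversed string keeping the longest accepting match.
import Mathlib
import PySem

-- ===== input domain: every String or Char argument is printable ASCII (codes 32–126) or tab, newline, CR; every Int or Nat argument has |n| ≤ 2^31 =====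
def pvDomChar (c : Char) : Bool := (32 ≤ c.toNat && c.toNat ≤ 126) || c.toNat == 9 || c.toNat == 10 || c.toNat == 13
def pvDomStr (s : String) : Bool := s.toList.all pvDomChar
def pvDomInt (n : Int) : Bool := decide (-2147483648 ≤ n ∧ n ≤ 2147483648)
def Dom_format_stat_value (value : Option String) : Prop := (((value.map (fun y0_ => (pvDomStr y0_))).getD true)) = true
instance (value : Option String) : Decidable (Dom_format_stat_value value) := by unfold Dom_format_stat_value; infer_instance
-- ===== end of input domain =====

-- B replaces A's sort-by-length + endswith loop over 15 suffix strings by a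
-- suffix automaton: a prefix-state table built once from the reversed suffixes,
-- walked over the reversed string keeping the longest accepting match (objective: alternative).

-- ===== PORT A =====
-- A's for-loop over the sorted suffix list: the first suffix s ends with wins
def fsvLoop (s : List Char) : List (List Char) → Option (List Char)
  | [] => none
  | suf :: rest =>
      if PySem.Chars.endswith s suf then
        some (PySem.Chars.slice s none (some (-(suf.length : Int))) ++ [' '] ++ suf)
      else fsvLoop s rest

def format_stat_value (value : Option String) : String :=
  match value with
  | none => "N/A"
  | some v =>
      let suffixes : List (List Char) :=
        [['K'], ['M'], ['B'], ['T'], ['q'], ['Q'], ['s'], ['S'], ['O'], ['N'], ['D'],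
         ['a','a'], ['a','b'], ['a','c'], ['a','d']]
      match fsvLoop v.toList (PySem.List.sorted suffixes (fun t => t.length) true) with
      | some r => String.ofList r
      | none => v

-- ===== PORT B =====
-- Source B's module-level build of _STATES: reversed-suffix prefixes -> accepting?
def fsvStates : PySem.Dict (List Char) Bool :=
  let suffixes : List (List Char) :=
    [['K'], ['M'], ['B'], ['T'], ['q'], ['Q'], ['s'], ['S'], ['O'], ['N'], ['D'],
     ['a','a'], ['a','b'], ['a','c'], ['a','d']]
  suffixes.foldl (fun st suf =>
    let r := suf.reverse
    let st := (PySem.List.pyRange 1 (r.length : Int) 1).foldl (fun st i =>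
        if st.contains (PySem.List.slice r none (some i)) then st
        else st.insert (PySem.List.slice r none (some i)) false) st
    st.insert r true) PySem.Dict.empty

-- Source B's 'for ch in reversed(s)' walk with its break
def fsvWalk (st : PySem.Dict (List Char) Bool) : List Char → List Char → Int → Int
  | [], _, best => best
  | ch :: rest, pfx, best =>
      let pfx := pfx ++ [ch]
      match st.get? pfx with
      | none => best
      | some acc => fsvWalk st rest pfx (if acc then (pfx.length : Int) else best)

def format_stat_value_alt (value : Option String) : String :=
  match value with
  | none => "N/A"
  | some v =>
      let s := v.toList
      let best := fsvWalk fsvStates s.reverse [] 0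
      if best ≠ 0 then
        String.ofList (PySem.Chars.slice s none (some (-best)) ++ ' ' ::
          PySem.Chars.slice s (some (-best)) none)
      else v

-- ===== PRECONDITION & SPEC =====
def Spec_format_stat_value (value : Option String) (out : String) : Prop := out = format_stat_value_alt value
instance (value : Option String) (out : String) : Decidable (Spec_format_stat_value value out) := by unfold Spec_format_stat_value; infer_instance

-- ===== CLAIM (what is proved, stated in full; the proofs are below) =====
def Claim_equal_format_stat_value : Prop := ∀ (value : Option String), Dom_format_stat_value value → Spec_format_stat_value value (format_stat_value value)

-- ===== LEMMAS AND PROOFS =====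

-- the states dict, evaluated
lemma fsvStates_eq : fsvStates = PySem.Dict.mk
    [(['K'], true), (['M'], true), (['B'], true), (['T'], true), (['q'], true),
     (['Q'], true), (['s'], true), (['S'], true), (['O'], true), (['N'], true),
     (['D'], true), (['a'], false), (['a','a'], true), (['b'], false), (['b','a'], true),
     (['c'], false), (['c','a'], true), (['d'], false), (['d','a'], true)] := by decide

-- every key has length ≤ 2, so a 3-char prefix is never in the dict
lemma fsv_get3_none (x y z : Char) (t : List Char) :
    (PySem.Dict.mk
    [(['K'], true), (['M'], true), (['B'], true), (['T'], true), (['q'], true),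
     (['Q'], true), (['s'], true), (['S'], true), (['O'], true), (['N'], true),
     (['D'], true), (['a'], false), (['a','a'], true), (['b'], false), (['b','a'], true),
     (['c'], false), (['c','a'], true), (['d'], false), (['d','a'], true)]).get? (x :: y :: z :: t) = none := by
  simp [PySem.Dict.get?]

-- once the prefix has length 2 the walk stops at the next step
lemma fsv_walk_stop (l : List Char) (x y : Char) (b : Int) :
    fsvWalk (PySem.Dict.mk
    [(['K'], true), (['M'], true), (['B'], true), (['T'], true), (['q'], true),
     (['Q'], true), (['s'], true), (['S'], true), (['O'], true), (['N'], true),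
     (['D'], true), (['a'], false), (['a','a'], true), (['b'], false), (['b','a'], true),
     (['c'], false), (['c','a'], true), (['d'], false), (['d','a'], true)]) l [x, y] b = b := by
  cases l with
  | nil => rfl
  | cons z r => simp [fsvWalk, fsv_get3_none]

-- s ends with the 1-char suffix [x] iff x is the last char
lemma fsv_ew1 (w : List Char) (c x : Char) :
    PySem.Chars.endswith (w ++ [c]) [x] = true ↔ c = x := by
  rw [PySem.Chars.endswith_iff]
  constructor
  · intro h
    have h2 : [x].reverse <+: (w ++ [c]).reverse := List.reverse_prefix.mpr h
    simp [List.cons_prefix_cons] at h2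
    tauto
  · rintro rfl; exact ⟨w, rfl⟩

-- s ends with the 2-char suffix [x, y] iff x, y are the last two chars
lemma fsv_ew2 (w : List Char) (d c x y : Char) :
    PySem.Chars.endswith (w ++ [d, c]) [x, y] = true ↔ (d = x ∧ c = y) := by
  rw [PySem.Chars.endswith_iff]
  constructor
  · intro h
    have h2 : [x, y].reverse <+: (w ++ [d, c]).reverse := List.reverse_prefix.mpr h
    simp [List.cons_prefix_cons] at h2
    tauto
  · rintro ⟨rfl, rfl⟩; exact ⟨w, rfl⟩

-- a singleton never ends with a 2-char suffix
lemma fsv_ew2_single (c x y : Char) : PySem.Chars.endswith [c] [x, y] = false := by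
  rw [Bool.eq_false_iff]
  intro h
  have hle := ((PySem.Chars.endswith_iff _ _).mp h).length_le
  simp at hle

lemma fsv_sl_to2 (w : List Char) (d c : Char) :
    PySem.List.slice (w ++ [d, c]) none (some (-2)) = w := by
  rw [PySem.List.slice_to_neg_ofNat _ 2 (by omega)]; simp

lemma fsv_sl_from2 (w : List Char) (d c : Char) :
    PySem.List.slice (w ++ [d, c]) (some (-2)) none = [d, c] := by
  rw [PySem.List.slice_from_neg_ofNat _ 2 (by omega)]; simp

lemma fsv_sl_to1 (w : List Char) (c : Char) :
    PySem.List.slice (w ++ [c]) none (some (-1)) = w := by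
  rw [PySem.List.slice_to_neg_one]; simp

lemma fsv_sl_from1 (w : List Char) (c : Char) :
    PySem.List.slice (w ++ [c]) (some (-1)) none = [c] := by
  rw [PySem.List.slice_from_neg_one]; simp

-- A's sorted(suffixes, key=len, reverse=True), evaluated
lemma fsv_sorted : PySem.List.sorted
    [['K'], ['M'], ['B'], ['T'], ['q'], ['Q'], ['s'], ['S'], ['O'], ['N'], ['D'],
     ['a','a'], ['a','b'], ['a','c'], ['a','d']] (fun t : List Char => t.length) true
  = [['a','a'], ['a','b'], ['a','c'], ['a','d'],
     ['K'], ['M'], ['B'], ['T'], ['q'], ['Q'], ['s'], ['S'], ['O'], ['N'], ['D']] := by decide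

set_option maxHeartbeats 4000000 in
lemma fsv_core (s : List Char) :
    format_stat_value (some (String.ofList s)) = format_stat_value_alt (some (String.ofList s)) := by
  have hrev := (List.reverse_reverse s).symm
  rcases hs : s.reverse with _ | ⟨c, t⟩
  · rw [hs] at hrev; simp at hrev; subst hrev; decide
  · rcases t with _ | ⟨d, w⟩
    · rw [hs] at hrev; simp at hrev; subst hrev
      have e2 : ∀ x y : Char, PySem.Chars.endswith [c] [x, y] = false :=
        fun x y => fsv_ew2_single c x y
      have e1 : ∀ x : Char, (PySem.Chars.endswith [c] [x] = true) ↔ c = x :=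
        fun x => fsv_ew1 [] c x
      have hrv : ([c] : List Char).reverse = [c] := rfl
      simp only [format_stat_value, format_stat_value_alt, String.toList_ofList, fsv_sorted,
        fsvLoop, e2, Bool.false_eq_true, if_false, e1, hrv]
      by_cases h1K : c = 'K'
      · subst h1K; decide
      by_cases h1M : c = 'M'
      · subst h1M; decide
      by_cases h1B : c = 'B'
      · subst h1B; decide
      by_cases h1T : c = 'T'
      · subst h1T; decide
      by_cases h1q : c = 'q'
      · subst h1q; decide
      by_cases h1Q : c = 'Q'
      · subst h1Q; decide
      by_cases h1s : c = 's'
      · subst h1s; decide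
      by_cases h1S : c = 'S'
      · subst h1S; decide
      by_cases h1O : c = 'O'
      · subst h1O; decide
      by_cases h1N : c = 'N'
      · subst h1N; decide
      by_cases h1D : c = 'D'
      · subst h1D; decide
      by_cases h1a : c = 'a'
      · subst h1a; decide
      by_cases h1b : c = 'b'
      · subst h1b; decide
      by_cases h1c : c = 'c'
      · subst h1c; decide
      by_cases h1d : c = 'd'
      · subst h1d; decide
      simp [h1K, h1M, h1B, h1T, h1q, h1Q, h1s, h1S, h1O, h1N, h1D, h1a, h1b, h1c, h1d, Ne.symm h1K, Ne.symm h1M, Ne.symm h1B, Ne.symm h1T, Ne.symm h1q, Ne.symm h1Q, Ne.symm h1s, Ne.symm h1S, Ne.symm h1O, Ne.symm h1N, Ne.symm h1D, Ne.symm h1a, Ne.symm h1b, Ne.symm h1c, Ne.symm h1d, fsvStates_eq, PySem.Dict.get?_mk_cons, PySem.Dict.get?, fsvWalk]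
    · rw [hs] at hrev; simp at hrev; rw [hrev]
      have e2 : ∀ x y : Char,
          (PySem.Chars.endswith (w.reverse ++ [d, c]) [x, y] = true) ↔ (d = x ∧ c = y) :=
        fun x y => fsv_ew2 w.reverse d c x y
      have e1 : ∀ x : Char, (PySem.Chars.endswith (w.reverse ++ [d, c]) [x] = true) ↔ c = x :=
        fun x => by simpa using fsv_ew1 (w.reverse ++ [d]) c x
      have hf1 : PySem.List.slice (w.reverse ++ [d, c]) (some (-1)) none = [c] := by
        simpa using fsv_sl_from1 (w.reverse ++ [d]) c
      have ht1 : PySem.List.slice (w.reverse ++ [d, c]) none (some (-1)) = w.reverse ++ [d] := by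
        simpa using fsv_sl_to1 (w.reverse ++ [d]) c
      have hrv : (w.reverse ++ [d, c]).reverse = c :: d :: w := by simp
      simp only [format_stat_value, format_stat_value_alt, String.toList_ofList, fsv_sorted,
        fsvLoop, e2, e1, hrv]
      by_cases hca : c = 'a'
      · subst hca
        by_cases hda : d = 'a'
        · subst hda; simp [fsvStates_eq, PySem.Dict.get?_mk_cons, PySem.Dict.get?, fsvWalk, fsv_walk_stop, fsv_sl_to2, fsv_sl_from2, hf1, ht1]
        · simp [hda, Ne.symm hda, fsvStates_eq, PySem.Dict.get?_mk_cons, PySem.Dict.get?, fsvWalk, fsv_walk_stop, fsv_sl_to2, fsv_sl_from2, hf1, ht1]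
      by_cases hcb : c = 'b'
      · subst hcb
        by_cases hda : d = 'a'
        · subst hda; simp [fsvStates_eq, PySem.Dict.get?_mk_cons, PySem.Dict.get?, fsvWalk, fsv_walk_stop, fsv_sl_to2, fsv_sl_from2, hf1, ht1]
        · simp [hda, Ne.symm hda, fsvStates_eq, PySem.Dict.get?_mk_cons, PySem.Dict.get?, fsvWalk, fsv_walk_stop, fsv_sl_to2, fsv_sl_from2, hf1, ht1]
      by_cases hcc : c = 'c'
      · subst hcc
        by_cases hda : d = 'a'
        · subst hda; simp [fsvStates_eq, PySem.Dict.get?_mk_cons, PySem.Dict.get?, fsvWalk, fsv_walk_stop, fsv_sl_to2, fsv_sl_from2, hf1, ht1]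
        · simp [hda, Ne.symm hda, fsvStates_eq, PySem.Dict.get?_mk_cons, PySem.Dict.get?, fsvWalk, fsv_walk_stop, fsv_sl_to2, fsv_sl_from2, hf1, ht1]
      by_cases hcd : c = 'd'
      · subst hcd
        by_cases hda : d = 'a'
        · subst hda; simp [fsvStates_eq, PySem.Dict.get?_mk_cons, PySem.Dict.get?, fsvWalk, fsv_walk_stop, fsv_sl_to2, fsv_sl_from2, hf1, ht1]
        · simp [hda, Ne.symm hda, fsvStates_eq, PySem.Dict.get?_mk_cons, PySem.Dict.get?, fsvWalk, fsv_walk_stop, fsv_sl_to2, fsv_sl_from2, hf1, ht1]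
      by_cases h1K : c = 'K'
      · subst h1K; simp [fsvStates_eq, PySem.Dict.get?_mk_cons, PySem.Dict.get?, fsvWalk, fsv_walk_stop, fsv_sl_to2, fsv_sl_from2, hf1, ht1]
      by_cases h1M : c = 'M'
      · subst h1M; simp [fsvStates_eq, PySem.Dict.get?_mk_cons, PySem.Dict.get?, fsvWalk, fsv_walk_stop, fsv_sl_to2, fsv_sl_from2, hf1, ht1]
      by_cases h1B : c = 'B'
      · subst h1B; simp [fsvStates_eq, PySem.Dict.get?_mk_cons, PySem.Dict.get?, fsvWalk, fsv_walk_stop, fsv_sl_to2, fsv_sl_from2, hf1, ht1]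
      by_cases h1T : c = 'T'
      · subst h1T; simp [fsvStates_eq, PySem.Dict.get?_mk_cons, PySem.Dict.get?, fsvWalk, fsv_walk_stop, fsv_sl_to2, fsv_sl_from2, hf1, ht1]
      by_cases h1q : c = 'q'
      · subst h1q; simp [fsvStates_eq, PySem.Dict.get?_mk_cons, PySem.Dict.get?, fsvWalk, fsv_walk_stop, fsv_sl_to2, fsv_sl_from2, hf1, ht1]
      by_cases h1Q : c = 'Q'
      · subst h1Q; simp [fsvStates_eq, PySem.Dict.get?_mk_cons, PySem.Dict.get?, fsvWalk, fsv_walk_stop, fsv_sl_to2, fsv_sl_from2, hf1, ht1]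
      by_cases h1s : c = 's'
      · subst h1s; simp [fsvStates_eq, PySem.Dict.get?_mk_cons, PySem.Dict.get?, fsvWalk, fsv_walk_stop, fsv_sl_to2, fsv_sl_from2, hf1, ht1]
      by_cases h1S : c = 'S'
      · subst h1S; simp [fsvStates_eq, PySem.Dict.get?_mk_cons, PySem.Dict.get?, fsvWalk, fsv_walk_stop, fsv_sl_to2, fsv_sl_from2, hf1, ht1]
      by_cases h1O : c = 'O'
      · subst h1O; simp [fsvStates_eq, PySem.Dict.get?_mk_cons, PySem.Dict.get?, fsvWalk, fsv_walk_stop, fsv_sl_to2, fsv_sl_from2, hf1, ht1]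
      by_cases h1N : c = 'N'
      · subst h1N; simp [fsvStates_eq, PySem.Dict.get?_mk_cons, PySem.Dict.get?, fsvWalk, fsv_walk_stop, fsv_sl_to2, fsv_sl_from2, hf1, ht1]
      by_cases h1D : c = 'D'
      · subst h1D; simp [fsvStates_eq, PySem.Dict.get?_mk_cons, PySem.Dict.get?, fsvWalk, fsv_walk_stop, fsv_sl_to2, fsv_sl_from2, hf1, ht1]
      simp [hca, hcb, hcc, hcd, h1K, h1M, h1B, h1T, h1q, h1Q, h1s, h1S, h1O, h1N, h1D, Ne.symm hca, Ne.symm hcb, Ne.symm hcc, Ne.symm hcd, Ne.symm h1K, Ne.symm h1M, Ne.symm h1B, Ne.symm h1T, Ne.symm h1q, Ne.symm h1Q, Ne.symm h1s, Ne.symm h1S, Ne.symm h1O, Ne.symm h1N, Ne.symm h1D, fsvStates_eq, PySem.Dict.get?_mk_cons, PySem.Dict.get?, fsvWalk]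

-- ===== VERDICT (by name: the statement is the Claim_ definition above) =====
theorem format_stat_value_spec : Claim_equal_format_stat_value := by
  intro value _
  unfold Spec_format_stat_value
  cases value with
  | none => rfl
  | some v => simpa using fsv_core v.toList
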